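-- pv_equiv track=rewrite | github.com/jj71951/CIS206---Jilson-Johnson | Session 6/S6P3.py | run_length_encode_with_escape
-- ===== SOURCE A (Python) =====
-- def run_length_encode_with_escape(input_string: str) -> str:
--   """
--   Encodes a string using RLE with escape sequences for numbers and `#`.
--
--   Args:
--       input_string (str): The input string to encode.
--
--   Returns:
--       str: The RLE-encoded string with escape sequences.
--   """
--   if not input_string.isalpha() and '#' not in input_string:
--       raise ValueError("Input must be alphabetic or contain # symbols.")
--
--   encoded = []
--   count = 1
--
--   for i in range(1, len(input_string)):
--       if input_string[i] == input_string[i - 1]: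
--           count += 1
--       else:
--           char = input_string[i - 1]
--           if char.isdigit() or char == '#':
--               char = f"#{char}"
--           encoded.append(char + (str(count) if count > 1 else ""))
--           count = 1
--
--   # Add the last character group
--   last_char = input_string[-1]
--   if last_char.isdigit() or last_char == '#':
--       last_char = f"#{last_char}"
--   encoded.append(last_char + (str(count) if count > 1 else ""))
--
--   return '##00' + ''.join(encoded)
-- ===== SOURCE B (Python) =====
-- def run_length_encode_with_escape(input_string: str) -> str:
--     if not input_string.isalpha() and '#' not in input_string:
--         raise ValueError("Input must be alphabetic or contain # symbols.")
--     pieces = []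
--     i, n = 0, len(input_string)
--     while i < n:
--         c = input_string[i]
--         j = i + 1
--         while j < n and input_string[j] == c:
--             j += 1
--         esc = '#' + c if (c.isdigit() or c == '#') else c
--         pieces.append(esc + (str(j - i) if j - i > 1 else ''))
--         i = j
--     return '##00' + ''.join(pieces)
-- ===== Notes on version B (the rewrite author's own statement) =====
-- stated objective: simpler
-- what changed: replaces A's compare-with-previous index loop with a count accumulator and a duplicated final-group block by a two-pointer run scanner that advances past each run and emits its piece in one place
import Mathlib
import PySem

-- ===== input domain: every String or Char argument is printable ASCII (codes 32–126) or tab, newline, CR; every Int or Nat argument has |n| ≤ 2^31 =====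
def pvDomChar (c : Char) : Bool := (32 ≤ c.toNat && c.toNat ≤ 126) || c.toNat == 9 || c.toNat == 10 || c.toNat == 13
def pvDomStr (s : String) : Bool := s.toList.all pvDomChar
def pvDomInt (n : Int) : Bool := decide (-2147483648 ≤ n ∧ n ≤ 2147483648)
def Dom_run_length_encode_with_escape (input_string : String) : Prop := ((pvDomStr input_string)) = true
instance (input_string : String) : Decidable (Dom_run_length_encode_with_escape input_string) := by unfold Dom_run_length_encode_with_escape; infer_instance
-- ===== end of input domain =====

-- B replaces A's compare-with-previous loop + count accumulator + duplicated final-group block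
-- by a two-pointer run scanner (objective: simpler; same O(n) cost).

-- ===== PORT A =====
-- escape + count formatting of one finished group (shared formatting of a run, used verbatim by both sources)
def pvPiece (c : Char) (count : Nat) : List Char :=
  (if PySem.Chars.isdigit c || c == '#' then ['#', c] else [c]) ++
  (if count > 1 then PySem.Int.toChars (count : Int) else [])

-- A's `for i in range(1, len)` loop: compare current char with previous, thread (encoded, count)
def pvLoopA : List Char → Char → Nat → List (List Char) → List (List Char) × Char × Nat
  | [], prev, count, enc => (enc, prev, count)
  | c :: rest, prev, count, enc =>
    if c == prev then pvLoopA rest prev (count + 1) enc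
    else pvLoopA rest c 1 (enc ++ [pvPiece prev count])

def run_length_encode_with_escape (input_string : String) : String :=
  match input_string.toList with
  | [] => ""   -- Python raises here (guard); excluded by Pre_
  | c :: rest =>
    let st := pvLoopA rest c 1 []
    let last_char := (PySem.List.pyGet? (c :: rest) (-1)).getD ' '  -- input_string[-1]
    String.ofList ("##00".toList ++ (st.1 ++ [pvPiece last_char st.2.2]).flatten)

-- ===== PORT B =====
-- B's two-pointer scan: at each position take the whole run, emit its piece, jump past it
def pvRunsB : List Char → List (List Char)
  | [] => []
  | c :: rest =>
    pvPiece c ((rest.takeWhile (· == c)).length + 1) :: pvRunsB (rest.dropWhile (· == c))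
  termination_by l => l.length
  decreasing_by
    have := List.length_dropWhile_le (· == c) rest
    simp; omega

def run_length_encode_with_escape_alt (input_string : String) : String :=
  String.ofList ("##00".toList ++ (pvRunsB input_string.toList).flatten)

-- ===== PRECONDITION & SPEC =====
-- Pre_ excludes exactly the inputs on which A's guard raises ValueError (neither alphabetic nor containing '#')
def Pre_run_length_encode_with_escape (input_string : String) : Prop :=
  PySem.Str.strIsalpha input_string = true ∨ PySem.Str.isIn "#" input_string = true
instance (input_string : String) : Decidable (Pre_run_length_encode_with_escape input_string) := by
  unfold Pre_run_length_encode_with_escape; infer_instance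

def pvWitness_run_length_encode_with_escape : String := "aab#7"

def Spec_run_length_encode_with_escape (input_string : String) (out : String) : Prop :=
  out = run_length_encode_with_escape_alt input_string
instance (input_string : String) (out : String) : Decidable (Spec_run_length_encode_with_escape input_string out) := by
  unfold Spec_run_length_encode_with_escape; infer_instance

-- ===== CLAIM (what is proved, stated in full; the proofs are below) =====
def Claim_equal_run_length_encode_with_escape : Prop := ∀ (input_string : String), Dom_run_length_encode_with_escape input_string → Pre_run_length_encode_with_escape input_string → Spec_run_length_encode_with_escape input_string (run_length_encode_with_escape input_string)

-- ===== LEMMAS AND PROOFS =====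

theorem pvRunsB_cons (c : Char) (rest : List Char) :
    pvRunsB (c :: rest) = pvPiece c ((rest.takeWhile (· == c)).length + 1)
      :: pvRunsB (rest.dropWhile (· == c)) := by
  rw [pvRunsB.eq_def]

theorem pv_getLastD_cons (c prev : Char) (rest : List Char) :
    (c :: rest).getLastD prev = rest.getLastD c := by
  cases rest with
  | nil => rfl
  | cons x xs =>
    rw [List.getLastD_eq_getLast?, List.getLastD_eq_getLast?, List.getLast?_cons_cons]
    cases hxs : (x :: xs).getLast? with
    | none => simp at hxs
    | some v => simp

-- the loop's tracked previous char is the last char seen (so it equals input_string[-1])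
theorem pvLoopA_prev (rest : List Char) : ∀ (prev : Char) (count : Nat) (enc : List (List Char)),
    (pvLoopA rest prev count enc).2.1 = rest.getLastD prev := by
  induction rest with
  | nil => intro prev count enc; simp [pvLoopA]
  | cons c rest ih =>
    intro prev count enc
    rw [pv_getLastD_cons]
    simp only [pvLoopA]
    by_cases h : c = prev
    · subst h; simp [ih]
    · simp [h, ih]

-- A's loop followed by its final-group emission produces exactly B's run pieces
theorem pvLoopA_spec (rest : List Char) : ∀ (prev : Char) (count : Nat) (enc : List (List Char)),
    (pvLoopA rest prev count enc).1 ++ [pvPiece (pvLoopA rest prev count enc).2.1 (pvLoopA rest prev count enc).2.2]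
      = enc ++ pvPiece prev (count + (rest.takeWhile (· == prev)).length)
              :: pvRunsB (rest.dropWhile (· == prev)) := by
  induction rest with
  | nil => intro prev count enc; simp [pvLoopA, pvRunsB]
  | cons c rest ih =>
    intro prev count enc
    simp only [pvLoopA]
    by_cases h : c = prev
    · subst h
      simp only [beq_self_eq_true, if_true, ih, List.takeWhile_cons, List.dropWhile_cons,
        List.length_cons]
      have : count + 1 + (rest.takeWhile (· == c)).length
           = count + ((rest.takeWhile (· == c)).length + 1) := by omega
      rw [this]
    · have hb : (c == prev) = false := by simp [h]
      rw [if_neg (by simp [h]), ih]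
      simp only [List.takeWhile_cons, List.dropWhile_cons, hb, Bool.false_eq_true, if_false,
        List.length_nil, Nat.add_zero]
      rw [pvRunsB_cons]
      simp [Nat.add_comm]

theorem run_length_encode_spec_aux (s : String)
    (hpre : Pre_run_length_encode_with_escape s) :
    run_length_encode_with_escape s = run_length_encode_with_escape_alt s := by
  rcases h : s.toList with _ | ⟨c, rest⟩
  · -- empty string: guard cannot pass
    exfalso
    rcases hpre with hp | hp
    · rw [show PySem.Str.strIsalpha s = PySem.Chars.strIsalpha s.toList from by
        simp [PySem.Str.strIsalpha_eq], h] at hp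
      exact absurd hp (by decide)
    · rw [show PySem.Str.isIn "#" s = PySem.Chars.isIn "#".toList s.toList from by
        simp [PySem.Str.isIn_eq], h] at hp
      exact absurd hp (by decide)
  · simp only [run_length_encode_with_escape, run_length_encode_with_escape_alt, h]
    have hlast : (PySem.List.pyGet? (c :: rest) (-1)).getD ' ' = rest.getLastD c := by
      rw [PySem.List.pyGet?_neg_one, ← pv_getLastD_cons c ' ' rest]
      rfl
    rw [hlast, ← pvLoopA_prev rest c 1 []]
    rw [pvLoopA_spec rest c 1 []]
    rw [pvRunsB_cons]
    simp [Nat.add_comm]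

-- ===== VERDICT (by name: the statement is the Claim_ definition above) =====
theorem run_length_encode_with_escape_spec : Claim_equal_run_length_encode_with_escape := by
  intro s _ hpre
  unfold Spec_run_length_encode_with_escape
  exact run_length_encode_spec_aux s hpre
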